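-- pv_equiv track=rewrite | github.com/Samyang7/Python-RomanNumberConverter | roman_arabic.py | find_single_value
-- ===== SOURCE A (Python) =====
-- def find_single_value(reverse_string, used_value, previous_value, index, element_dict, signal):
--     value = 0
--     degree = degree2= 0
--
--     while True:
--         # the searching idea is bascially same as 'find_double_function'
--         if signal == 0:
--             num = [1, 5]
--             T = num[0]*10**degree
--             T2 = num[1]*10**degree2
--             while T in used_value or T <= previous_value:
--                 degree += 1
--                 T = num[0]*10**degree
--             while T2 in used_value or T2 <= previous_value:
--                 degree2 += 1
--                 T2 = num[1]*10**degree2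
--
--
--             if T >= T2:
--                 if T2 > previous_value:
--                     value = T2
--                     break
--                 elif T > previous_value:
--                     value = T
--                     break
--             else:
--                 if T > previous_value:
--                     value = T
--                     break
--                 elif T2 > previous_value:
--                     value = T2
--                     break
--
--         else:
--             num = [1]
--             T = num[0]*10**degree
--             while T in used_value or T <= previous_value:
--                 degree += 1
--                 T = num[0]*10**degree
--
--             if T > previous_value:
--                 value = T
--                 break
--
--     used_value.append(value)
--     element_dict[reverse_string[index]] = value
--     return value
-- ===== SOURCE B (Python) =====
-- def find_single_value(reverse_string, used_value, previous_value, index, element_dict, sig):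
--     # parameter `signal` renamed to `sig` (same positional signature).
--     # B: instead of A's two independent per-base searches plus a four-branch
--     # comparison, scan the single ascending candidate stream
--     # 1, 5, 10, 50, 100, ... (only powers of 10 when sig != 0) and return the
--     # FIRST candidate that is > previous_value and not yet used: because the
--     # stream is strictly increasing, the first hit IS the minimum, so no min()
--     # or branch comparison is ever needed.
--     used = set(used_value)
--     bases = (1, 5) if sig == 0 else (1,)
--     d = 0
--     while True:
--         for b in bases:
--             c = b * 10 ** d
--             if c > previous_value and c not in used:
--                 used_value.append(c)
--                 element_dict[reverse_string[index]] = c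
--                 return c
--         d += 1
-- ===== Notes on version B (the rewrite author's own statement) =====
-- stated objective: alternative
-- what changed: A runs two independent unbounded per-base searches (separate degree counters) and then resolves the winner through a four-branch comparison tangle inside a degenerate while-True; B instead scans the single merged, strictly increasing candidate stream 1,5,10,50,... once and returns the first candidate that is > previous_value and unused, so the minimum falls out of the traversal order and no comparison of finalists exists.
import Mathlib
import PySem

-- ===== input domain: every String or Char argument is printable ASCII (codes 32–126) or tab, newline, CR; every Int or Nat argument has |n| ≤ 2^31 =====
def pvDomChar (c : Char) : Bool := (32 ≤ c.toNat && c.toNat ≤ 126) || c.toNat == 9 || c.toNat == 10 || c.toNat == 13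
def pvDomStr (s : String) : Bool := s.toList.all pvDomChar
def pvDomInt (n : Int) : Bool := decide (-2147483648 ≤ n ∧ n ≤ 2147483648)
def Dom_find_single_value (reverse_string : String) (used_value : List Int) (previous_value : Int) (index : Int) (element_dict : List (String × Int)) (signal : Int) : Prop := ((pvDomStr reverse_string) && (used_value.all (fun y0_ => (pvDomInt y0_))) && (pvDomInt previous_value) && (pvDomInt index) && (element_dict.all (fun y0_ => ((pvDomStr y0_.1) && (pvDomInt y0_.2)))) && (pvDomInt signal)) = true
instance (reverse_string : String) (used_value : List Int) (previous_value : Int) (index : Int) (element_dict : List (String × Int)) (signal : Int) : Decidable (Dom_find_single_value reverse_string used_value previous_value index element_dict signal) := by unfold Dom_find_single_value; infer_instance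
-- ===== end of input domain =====

-- B scans the single merged ascending candidate stream 1,5,10,50,... and returns the first
-- valid candidate, instead of A's two independent per-base searches plus a comparison tangle.
-- Equivalence is about the RETURN value only: both Pythons also append to used_value and
-- write element_dict[reverse_string[index]], side effects not modelled here.

-- ===== PORT A =====
-- the inner 'while T in used_value or T <= previous_value: degree += 1; T = num0*10**degree';
-- returns the final degree.  Fuel is a totality guard only: on the domain Dom the search
-- always succeeds within it (lemma pvWhileT_spec below).
def pvWhileT (used : List Int) (prev : Int) (num0 : Int) : Nat → Nat → Nat
  | 0, degree => degree
  | f + 1, degree =>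
      if num0 * 10 ^ degree ∈ used ∨ num0 * 10 ^ degree ≤ prev then
        pvWhileT used prev num0 f (degree + 1)
      else degree

-- the outer 'while True' of A, carrying (degree, degree2); fuel-exhaustion returns the
-- initial value 0 (unreachable: the body always breaks, see the proofs below).
def pvOuterA (used : List Int) (prev : Int) (signal : Int) : Nat → Nat → Nat → Int
  | 0, _, _ => 0
  | f + 1, degree, degree2 =>
      if signal = 0 then
        let degree := pvWhileT used prev 1 44 degree
        let degree2 := pvWhileT used prev 5 44 degree2
        let T : Int := 1 * 10 ^ degree
        let T2 : Int := 5 * 10 ^ degree2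
        if T ≥ T2 then
          if T2 > prev then T2
          else if T > prev then T
          else pvOuterA used prev signal f degree degree2
        else
          if T > prev then T
          else if T2 > prev then T2
          else pvOuterA used prev signal f degree degree2
      else
        let degree := pvWhileT used prev 1 44 degree
        let T : Int := 1 * 10 ^ degree
        if T > prev then T
        else pvOuterA used prev signal f degree degree2

def find_single_value (reverse_string : String) (used_value : List Int) (previous_value : Int) (index : Int) (element_dict : List (String × Int)) (signal : Int) : Int :=
  pvOuterA used_value previous_value signal 1 0 0

-- ===== PORT B =====
-- 'for b in bases: c = b*10**d; if c > previous_value and c not in used: return c'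
-- (for-with-break over the bases list)
def pvFor (used : PySem.Set Int) (prev : Int) (d : Nat) : List Int → Option Int
  | [] => none
  | b :: rest =>
      if prev < b * 10 ^ d ∧ ¬ (PySem.Set.contains used (b * 10 ^ d) = true) then some (b * 10 ^ d)
      else pvFor used prev d rest

-- the 'while True: …; d += 1' scan over degrees.  Fuel is a totality guard only (on Dom
-- the scan succeeds by degree 10, see the proofs below); fuel-exhaustion returns 0.
def pvScan (used : PySem.Set Int) (prev : Int) (bases : List Int) : Nat → Nat → Int
  | 0, _ => 0
  | f + 1, d =>
      match pvFor used prev d bases with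
      | some c => c
      | none => pvScan used prev bases f (d + 1)

def find_single_value_alt (reverse_string : String) (used_value : List Int) (previous_value : Int) (index : Int) (element_dict : List (String × Int)) (signal : Int) : Int :=
  let used := PySem.Set.ofList used_value
  let bases : List Int := if signal = 0 then [1, 5] else [1]
  pvScan used previous_value bases 44 0

-- ===== PRECONDITION & SPEC =====
-- Pre_ excludes exactly the inputs where Python A raises IndexError on reverse_string[index].
def Pre_find_single_value (reverse_string : String) (used_value : List Int) (previous_value : Int) (index : Int) (element_dict : List (String × Int)) (signal : Int) : Prop :=
  -(reverse_string.toList.length : Int) ≤ index ∧ index < (reverse_string.toList.length : Int)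
instance (reverse_string : String) (used_value : List Int) (previous_value : Int) (index : Int) (element_dict : List (String × Int)) (signal : Int) : Decidable (Pre_find_single_value reverse_string used_value previous_value index element_dict signal) := by unfold Pre_find_single_value; infer_instance

def pvWitness_find_single_value : String × List Int × Int × Int × (List (String × Int)) × Int :=
  ("I", [1], 1, 0, [], 0)

def Spec_find_single_value (reverse_string : String) (used_value : List Int) (previous_value : Int) (index : Int) (element_dict : List (String × Int)) (signal : Int) (out : Int) : Prop := out = find_single_value_alt reverse_string used_value previous_value index element_dict signal
instance (reverse_string : String) (used_value : List Int) (previous_value : Int) (index : Int) (element_dict : List (String × Int)) (signal : Int) (out : Int) : Decidable (Spec_find_single_value reverse_string used_value previous_value index element_dict signal out) := by unfold Spec_find_single_value; infer_instance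

-- ===== CLAIM (what is proved, stated in full; the proofs are below) =====
def Claim_equal_find_single_value : Prop := ∀ (reverse_string : String) (used_value : List Int) (previous_value : Int) (index : Int) (element_dict : List (String × Int)) (signal : Int), Dom_find_single_value reverse_string used_value previous_value index element_dict signal → Pre_find_single_value reverse_string used_value previous_value index element_dict signal → Spec_find_single_value reverse_string used_value previous_value index element_dict signal (find_single_value reverse_string used_value previous_value index element_dict signal)

-- ===== LEMMAS AND PROOFS =====

-- A's inner while: if some degree within the fuel is valid, the result is the FIRST valid
-- degree ≥ the start (valid = not used and > prev); every degree before it fails.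
lemma pvWhileT_spec (used : List Int) (prev num0 : Int) :
    ∀ (f d : Nat), (∃ j < f + 1, num0 * 10 ^ (d + j) ∉ used ∧ prev < num0 * 10 ^ (d + j)) →
      d ≤ pvWhileT used prev num0 f d ∧
      (num0 * 10 ^ (pvWhileT used prev num0 f d) ∉ used ∧ prev < num0 * 10 ^ (pvWhileT used prev num0 f d)) ∧
      (∀ e, d ≤ e → e < pvWhileT used prev num0 f d → num0 * 10 ^ e ∈ used ∨ num0 * 10 ^ e ≤ prev) := by
  intro f
  induction f with
  | zero =>
      intro d ⟨j, hj, h⟩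
      interval_cases j
      simp only [Nat.add_zero] at h
      exact ⟨le_refl _, by simpa [pvWhileT] using h, by intro e he1 he2; simp [pvWhileT] at he2; omega⟩
  | succ f ih =>
      intro d ⟨j, hj, h⟩
      simp only [pvWhileT]
      by_cases hc : num0 * 10 ^ d ∈ used ∨ num0 * 10 ^ d ≤ prev
      · rw [if_pos hc]
        have hj0 : j ≠ 0 := by
          rintro rfl
          simp only [Nat.add_zero] at h
          rcases hc with hc | hc
          · exact h.1 hc
          · omega
        have hex : ∃ j < f + 1, num0 * 10 ^ (d + 1 + j) ∉ used ∧ prev < num0 * 10 ^ (d + 1 + j) :=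
          ⟨j - 1, by omega, by
            have : d + 1 + (j - 1) = d + j := by omega
            rw [this]; exact h⟩
        obtain ⟨h1, h2, h3⟩ := ih (d + 1) hex
        refine ⟨by omega, h2, ?_⟩
        intro e he1 he2
        by_cases hed : e = d
        · subst hed; exact hc
        · exact h3 e (by omega) he2
      · rw [if_neg hc]
        push_neg at hc
        exact ⟨le_refl _, ⟨hc.1, by omega⟩, by intro e he1 he2; omega⟩

-- on the domain, degree 10 is valid for bases 1 and 5
lemma pvWhileT_dom (used : List Int) (prev num0 : Int)
    (hused : ∀ x ∈ used, x ≤ 2147483648) (hprev : prev ≤ 2147483648)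
    (hnum : num0 = 1 ∨ num0 = 5) :
    ∃ j < 44 + 1, num0 * 10 ^ (0 + j) ∉ used ∧ prev < num0 * 10 ^ (0 + j) := by
  refine ⟨10, by omega, ?_, ?_⟩
  · intro hmem
    have := hused _ hmem
    rcases hnum with rfl | rfl <;> norm_num at this
  · rcases hnum with rfl | rfl <;> norm_num <;> omega

-- B's merged scan over [1,5] returns min(10^D1, 5*10^D2) where D1, D2 are the first valid
-- degrees for each base: the stream is strictly increasing, so the first hit is the minimum.
lemma pvScan_two (used : List Int) (prev : Int) (D1 D2 : Nat)
    (h1 : (10:Int) ^ D1 ∉ used ∧ prev < 10 ^ D1)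
    (h2 : (5:Int) * 10 ^ D2 ∉ used ∧ prev < 5 * 10 ^ D2)
    (m1 : ∀ e, e < D1 → (10:Int) ^ e ∈ used ∨ (10:Int) ^ e ≤ prev)
    (m2 : ∀ e, e < D2 → (5:Int) * 10 ^ e ∈ used ∨ (5:Int) * 10 ^ e ≤ prev) :
    ∀ (f d : Nat), d ≤ D1 → d ≤ D2 → min D1 D2 < d + f →
      pvScan (PySem.Set.ofList used) prev [1, 5] f d = min ((10:Int) ^ D1) (5 * 10 ^ D2) := by
  intro f
  induction f with
  | zero => intro d hd1 hd2 hf; omega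
  | succ f ih =>
      intro d hd1 hd2 hf
      have hcont : ∀ c : Int, (PySem.Set.contains (PySem.Set.ofList used) c = true) ↔ c ∈ used := by
        intro c; rw [PySem.Set.contains_iff, PySem.Set.mem_ofList]
      simp only [pvScan, pvFor, one_mul]
      by_cases hv1 : prev < (10:Int) ^ d ∧ ¬ (PySem.Set.contains (PySem.Set.ofList used) ((10:Int) ^ d) = true)
      · -- base 1 hits: d = D1 by minimality of D1
        rw [if_pos hv1]
        have hdD1 : d = D1 := by
          by_contra hne
          rcases m1 d (by omega) with h | h
          · exact hv1.2 ((hcont _).mpr h)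
          · omega
        subst hdD1
        have hle : (10:Int) ^ d ≤ 5 * 10 ^ D2 := by
          calc (10:Int) ^ d ≤ 10 ^ D2 := by apply pow_le_pow_right₀ (by norm_num) hd2
            _ ≤ 5 * 10 ^ D2 := by nlinarith [pow_pos (show (0:Int) < 10 by norm_num) D2]
        simp [min_eq_left hle]
      · -- base 1 misses at d
        rw [if_neg hv1]
        have hdD1' : d < D1 := by
          rcases Nat.lt_or_ge d D1 with h | h
          · exact h
          · have hd : d = D1 := by omega
            subst hd
            exact absurd ⟨h1.2, fun hc => h1.1 ((hcont _).mp hc)⟩ hv1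
        by_cases hv2 : prev < (5:Int) * 10 ^ d ∧ ¬ (PySem.Set.contains (PySem.Set.ofList used) ((5:Int) * 10 ^ d) = true)
        · -- base 5 hits: d = D2 by minimality of D2
          rw [if_pos hv2]
          have hdD2 : d = D2 := by
            by_contra hne
            rcases m2 d (by omega) with h | h
            · exact hv2.2 ((hcont _).mpr h)
            · omega
          subst hdD2
          have hle : (5:Int) * 10 ^ d ≤ 10 ^ D1 := by
            calc (5:Int) * 10 ^ d ≤ 10 * 10 ^ d := by
                  nlinarith [pow_pos (show (0:Int) < 10 by norm_num) d]
              _ = 10 ^ (d + 1) := by ring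
              _ ≤ 10 ^ D1 := by apply pow_le_pow_right₀ (by norm_num) (by omega)
          simp [min_eq_right hle]
        · -- both miss: step to the next degree
          rw [if_neg hv2]
          have hdD2' : d < D2 := by
            rcases Nat.lt_or_ge d D2 with h | h
            · exact h
            · have hd : d = D2 := by omega
              subst hd
              exact absurd ⟨h2.2, fun hc => h2.1 ((hcont _).mp hc)⟩ hv2
          exact ih (d + 1) (by omega) (by omega) (by omega)

-- B's scan over [1] returns 10^D1, the first valid power of 10
lemma pvScan_one (used : List Int) (prev : Int) (D1 : Nat)
    (h1 : (10:Int) ^ D1 ∉ used ∧ prev < 10 ^ D1)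
    (m1 : ∀ e, e < D1 → (10:Int) ^ e ∈ used ∨ (10:Int) ^ e ≤ prev) :
    ∀ (f d : Nat), d ≤ D1 → D1 < d + f →
      pvScan (PySem.Set.ofList used) prev [1] f d = (10:Int) ^ D1 := by
  intro f
  induction f with
  | zero => intro d hd hf; omega
  | succ f ih =>
      intro d hd hf
      have hcont : ∀ c : Int, (PySem.Set.contains (PySem.Set.ofList used) c = true) ↔ c ∈ used := by
        intro c; rw [PySem.Set.contains_iff, PySem.Set.mem_ofList]
      simp only [pvScan, pvFor, one_mul]
      by_cases hv1 : prev < (10:Int) ^ d ∧ ¬ (PySem.Set.contains (PySem.Set.ofList used) ((10:Int) ^ d) = true)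
      · rw [if_pos hv1]
        have hdD1 : d = D1 := by
          by_contra hne
          rcases m1 d (by omega) with h | h
          · exact hv1.2 ((hcont _).mpr h)
          · omega
        subst hdD1; rfl
      · rw [if_neg hv1]
        have hdD1' : d < D1 := by
          rcases Nat.lt_or_ge d D1 with h | h
          · exact h
          · have hd : d = D1 := by omega
            subst hd
            exact absurd ⟨h1.2, fun hc => h1.1 ((hcont _).mp hc)⟩ hv1
        exact ih (d + 1) (by omega) (by omega)

-- ===== VERDICT (by name: the statement is the Claim_ definition above) =====
theorem find_single_value_spec : Claim_equal_find_single_value := by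
  intro reverse_string used_value previous_value index element_dict signal hdom _hpre
  unfold Spec_find_single_value find_single_value find_single_value_alt
  have hb : (used_value.all (fun y0_ => pvDomInt y0_)) = true ∧ pvDomInt previous_value = true := by
    unfold Dom_find_single_value at hdom
    simp only [Bool.and_eq_true] at hdom
    exact ⟨hdom.1.1.1.1.2, hdom.1.1.1.2⟩
  have hused : ∀ x ∈ used_value, x ≤ 2147483648 := by
    intro x hx
    have := (List.all_eq_true.mp hb.1) x hx
    simp only [pvDomInt, decide_eq_true_eq] at this
    omega
  have hprev : previous_value ≤ 2147483648 := by
    have := hb.2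
    simp only [pvDomInt, decide_eq_true_eq] at this
    omega
  have hex1 := pvWhileT_dom used_value previous_value 1 hused hprev (Or.inl rfl)
  have hex5 := pvWhileT_dom used_value previous_value 5 hused hprev (Or.inr rfl)
  obtain ⟨_, hv1, hm1⟩ := pvWhileT_spec used_value previous_value 1 44 0 hex1
  obtain ⟨_, hv5, hm5⟩ := pvWhileT_spec used_value previous_value 5 44 0 hex5
  set D1 := pvWhileT used_value previous_value 1 44 0 with hD1
  set D2 := pvWhileT used_value previous_value 5 44 0 with hD2
  simp only [one_mul] at hv1 hv5
  -- bounds: D1, D2 ≤ 10 since degree 10 is valid (minimality)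
  have hD1le : D1 ≤ 10 := by
    by_contra hgt
    push_neg at hgt
    rcases hm1 10 (by omega) (by omega) with h | h
    · have := hused _ (by simpa using h); norm_num at this
    · simp only [one_mul] at h; omega
  have hD2le : D2 ≤ 10 := by
    by_contra hgt
    push_neg at hgt
    rcases hm5 10 (by omega) (by omega) with h | h
    · have := hused _ h; norm_num at this
    · omega
  have hm1' : ∀ e, e < D1 → (10:Int) ^ e ∈ used_value ∨ (10:Int) ^ e ≤ previous_value := by
    intro e he
    have := hm1 e (by omega) he
    simpa using this
  have hm5' : ∀ e, e < D2 → (5:Int) * 10 ^ e ∈ used_value ∨ (5:Int) * 10 ^ e ≤ previous_value := by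
    intro e he; exact hm5 e (by omega) he
  by_cases hs : signal = 0
  · subst hs
    simp only [pvOuterA, if_true]
    rw [← hD1, ← hD2]
    rw [pvScan_two used_value previous_value D1 D2 hv1 hv5 hm1' hm5' 44 0 (by omega) (by omega) (by omega)]
    have hp1 := hv1.2
    have hp5 := hv5.2
    rw [min_def]
    simp only [one_mul]
    split_ifs <;> omega
  · simp only [pvOuterA, if_neg hs]
    rw [← hD1]
    rw [pvScan_one used_value previous_value D1 hv1 hm1' 44 0 (by omega) (by omega)]
    rw [if_pos (by simpa using hv1.2)]
    ring
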